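-- pv_equiv track=rewrite | github.com/DelroyGayle/VariousAlgorithms | generate_base_numbers/gen_octal_numbers_queue.py | generate_octal_numbers
-- ===== SOURCE A (Python) =====
-- def generate_octal_numbers(n):
--     """
--     Proof of concept:
--     Generate 'n' octal numbers using the Python 'Queue' data structure
--     That is, generate the first 'n' octal numbers
--     The algorithm must take in an integer 'n' as input and return
--     a list of the first 'n' octal numbers.
--     """
--
--     from queue import Queue
--
--     result = []
--     if n <= 0:
--         return result
--
--     queue = Queue()
--     # Enqueue the first set of octal numbers
--     [queue.put(str(suffix)) for suffix in range(1, 8)]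
--
--     while True:
--         current = queue.get()
--         result.append(current)
--         [queue.put(current + str(suffix)) for suffix in range(0, 8)]
--
--         n -= 1
--         if n == 0:
--             break
--
--     return result
-- ===== SOURCE B (Python) =====
-- def generate_octal_numbers(n):
--     """Return the first n octal numbers as strings (no queue: direct base-8 conversion)."""
--     if n <= 0:
--         return []
--     result = []
--     for i in range(1, n + 1):
--         s = ""
--         x = i
--         while x > 0:
--             x, r = divmod(x, 8)
--             s = str(r) + s
--         result.append(s)
--     return result
-- ===== Notes on version B (the rewrite author's own statement) =====
-- stated objective: simpler
-- what changed: Replaces A's breadth-first FIFO-queue generation (pop a string, push its eight children) by a plain counting loop that converts each i in 1..n to octal by repeated divmod, keeping no queue of 7n pending strings.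
import Mathlib
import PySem

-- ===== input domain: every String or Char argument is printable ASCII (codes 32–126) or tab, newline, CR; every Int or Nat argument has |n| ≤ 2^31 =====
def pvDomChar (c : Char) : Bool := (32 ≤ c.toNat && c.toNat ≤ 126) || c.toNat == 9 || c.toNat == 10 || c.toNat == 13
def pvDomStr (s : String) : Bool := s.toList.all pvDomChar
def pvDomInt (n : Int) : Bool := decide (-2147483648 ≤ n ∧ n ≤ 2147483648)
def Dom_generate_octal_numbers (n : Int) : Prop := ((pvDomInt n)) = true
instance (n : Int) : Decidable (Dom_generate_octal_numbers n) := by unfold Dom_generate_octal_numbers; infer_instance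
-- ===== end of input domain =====

-- B replaces A's breadth-first FIFO-queue generation by a counting loop with per-number
-- divmod base-8 conversion (simpler; no queue of pending strings).

-- ===== PORT A =====
-- A's 'while True' loop: the counter n (≥ 1 at entry) is decremented each pass and the loop
-- breaks at 0, so the fuel is exactly n.toNat; the queue is a FIFO list (get = head, put = append).
def pvLoopA : Nat → List String → List String → List String
  | 0, _, result => result
  | _ + 1, [], result => result   -- unreachable: the queue always holds ≥ 7 strings (Queue.get would block)
  | fuel + 1, current :: rest, result =>
      pvLoopA fuel
        (rest ++ (PySem.List.pyRange 0 8 1).map (fun suffix => current ++ PySem.Int.toStr suffix))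
        (result ++ [current])

def generate_octal_numbers (n : Int) : List String :=
  if n ≤ 0 then []
  else pvLoopA n.toNat ((PySem.List.pyRange 1 8 1).map (fun suffix => PySem.Int.toStr suffix)) []

-- ===== PORT B =====
-- Source B's inner 'while x > 0' loop; x strictly decreases each pass, so fuel x.toNat suffices.
def pvOctDigits : Nat → Int → String → String
  | 0, _, s => s
  | fuel + 1, x, s =>
      if 0 < x then
        pvOctDigits fuel (PySem.Int.floordiv x 8) (PySem.Int.toStr (PySem.Int.mod x 8) ++ s)
      else s

def generate_octal_numbers_alt (n : Int) : List String :=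
  if n ≤ 0 then []
  else (PySem.List.pyRange 1 (n + 1) 1).map (fun i => pvOctDigits i.toNat i "")

-- ===== PRECONDITION & SPEC =====
def Spec_generate_octal_numbers (n : Int) (out : List String) : Prop := out = generate_octal_numbers_alt n
instance (n : Int) (out : List String) : Decidable (Spec_generate_octal_numbers n out) := by unfold Spec_generate_octal_numbers; infer_instance

-- ===== CLAIM (what is proved, stated in full; the proofs are below) =====
def Claim_equal_generate_octal_numbers : Prop := ∀ (n : Int), Dom_generate_octal_numbers n → Spec_generate_octal_numbers n (generate_octal_numbers n)

-- ===== LEMMAS AND PROOFS =====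

-- the octal string of i, with the exact fuel Source B's loop gets
def pvOI (i : Int) : String := pvOctDigits i.toNat i ""

lemma pvFloordiv8_lt (x : Int) (hx : 0 < x) : (PySem.Int.floordiv x 8).toNat < x.toNat := by
  rw [PySem.Int.floordiv_eq_ediv_of_pos (by norm_num)]
  omega

lemma pvOctDigits_fuel : ∀ (f g : Nat) (x : Int) (s : String),
    x.toNat ≤ f → x.toNat ≤ g → pvOctDigits f x s = pvOctDigits g x s := by
  intro f
  induction f with
  | zero =>
      intro g x s hf _
      have hx : ¬ 0 < x := by omega
      cases g with
      | zero => rfl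
      | succ g => simp [pvOctDigits, hx]
  | succ f ih =>
      intro g x s hf hg
      by_cases hx : 0 < x
      · have hlt := pvFloordiv8_lt x hx
        cases g with
        | zero => omega
        | succ g =>
            simp only [pvOctDigits, hx, if_pos]
            exact ih g _ _ (by omega) (by omega)
      · cases g with
        | zero =>
            have : x.toNat = 0 := by omega
            simp [pvOctDigits, hx]
        | succ g => simp [pvOctDigits, hx]

lemma pvOctDigits_append : ∀ (f : Nat) (x : Int) (s : String),
    pvOctDigits f x s = pvOctDigits f x "" ++ s := by
  intro f
  induction f with
  | zero => intro x s; simp [pvOctDigits]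
  | succ f ih =>
      intro x s
      by_cases hx : 0 < x
      · simp only [pvOctDigits, hx, if_pos]
        rw [ih _ (PySem.Int.toStr (PySem.Int.mod x 8) ++ s),
            ih _ (PySem.Int.toStr (PySem.Int.mod x 8) ++ "")]
        simp [String.append_assoc]
      · simp [pvOctDigits, hx]

-- the BFS child step: appending digit d to the octal string of x gives the octal string of 8x+d
lemma pvOI_child (x d : Int) (hx : 1 ≤ x) (hd0 : 0 ≤ d) (hd8 : d < 8) :
    pvOI (8 * x + d) = pvOI x ++ PySem.Int.toStr d := by
  unfold pvOI
  obtain ⟨f, hf⟩ : ∃ f, (8 * x + d).toNat = f + 1 := ⟨(8 * x + d).toNat - 1, by omega⟩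
  rw [hf]
  have hpos : 0 < 8 * x + d := by omega
  have hdiv : PySem.Int.floordiv (8 * x + d) 8 = x := by
    rw [PySem.Int.floordiv_eq_ediv_of_pos (by norm_num)]; omega
  have hmod : PySem.Int.mod (8 * x + d) 8 = d := by
    rw [PySem.Int.mod_eq_emod_of_pos (by norm_num)]; omega
  simp only [pvOctDigits, hpos, if_pos, hdiv, hmod]
  rw [pvOctDigits_append f x, pvOctDigits_fuel f x.toNat x ""
        (by have := pvFloordiv8_lt (8 * x + d) hpos; rw [hdiv] at this; omega) le_rfl]
  simp

-- accumulator shape of A's loop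
lemma pvLoopA_acc : ∀ (k : Nat) (q res : List String),
    pvLoopA k q res = res ++ pvLoopA k q [] := by
  intro k
  induction k with
  | zero => intro q res; simp [pvLoopA]
  | succ k ih =>
      intro q res
      cases q with
      | nil => simp [pvLoopA]
      | cons c rest =>
          simp only [pvLoopA]
          rw [ih _ (res ++ [c]), ih _ ([] ++ [c])]
          simp

-- the queue invariant: about to pop the octal string of m, the queue holds octal of m..8m-1
lemma pvLoopA_inv : ∀ (k : Nat) (m : Int), 1 ≤ m →
    pvLoopA k ((PySem.List.pyRange m (8 * m) 1).map pvOI) []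
      = (PySem.List.pyRange m (m + k) 1).map pvOI := by
  intro k
  induction k with
  | zero =>
      intro m _
      have h0 : PySem.List.pyRange m (m + ((0 : ℕ) : Int)) 1 = [] :=
        PySem.List.pyRange_one_eq_nil (by push_cast; omega)
      rw [h0]
      simp [pvLoopA]
  | succ k ih =>
      intro m hm
      rw [PySem.List.pyRange_one_cons (a := m) (b := 8 * m) (by omega)]
      simp only [List.map_cons, pvLoopA]
      have hchild : (PySem.List.pyRange 0 8 1).map (fun suffix => pvOI m ++ PySem.Int.toStr suffix)
          = (PySem.List.pyRange (8 * m) (8 * m + 8) 1).map pvOI := by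
        rw [PySem.List.pyRange_one 0 8, PySem.List.pyRange_one (8 * m) (8 * m + 8)]
        have e1 : ((8 : Int) - 0).toNat = 8 := by decide
        have e2 : (8 * m + 8 - 8 * m : Int).toNat = 8 := by omega
        rw [e1, e2]
        simp only [List.map_map]
        apply List.map_congr_left
        intro j hj
        have hj8 : j < 8 := List.mem_range.mp hj
        simp only [Function.comp_apply, zero_add]
        exact (pvOI_child m j hm (by positivity) (by exact_mod_cast hj8)).symm
      rw [hchild, ← List.map_append,
          ← PySem.List.pyRange_one_append (m + 1) (8 * m) (8 * m + 8) (by omega) (by omega)]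
      have h8 : 8 * m + 8 = 8 * (m + 1) := by ring
      rw [h8, pvLoopA_acc, ih (m + 1) (by omega)]
      push_cast
      rw [show m + ((k : Int) + 1) = m + 1 + (k : Int) from by ring]
      rw [PySem.List.pyRange_one_cons (a := m) (b := m + 1 + (k : Int)) (by omega)]
      simp

-- A's seven seed strings are exactly the octal strings of 1..7
lemma pvSeed : (PySem.List.pyRange 1 8 1).map (fun suffix => PySem.Int.toStr suffix)
    = (PySem.List.pyRange 1 (8 * 1) 1).map pvOI := by
  decide

-- ===== VERDICT (by name: the statement is the Claim_ definition above) =====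
theorem generate_octal_numbers_spec : Claim_equal_generate_octal_numbers := by
  intro n _
  unfold Spec_generate_octal_numbers generate_octal_numbers generate_octal_numbers_alt
  by_cases hn : n ≤ 0
  · simp [hn]
  · simp only [hn, if_false]
    rw [pvSeed, pvLoopA_inv n.toNat 1 le_rfl]
    have h1 : 1 + (n.toNat : Int) = n + 1 := by omega
    rw [h1]
    rfl
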